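-- pv_equiv track=rewrite | github.com/jeyziel/python-studies | python-zumbies/Seletiva-facebook/hackaton.py | hack
-- ===== SOURCE A (Python) =====
-- def hack(n, k):
--     def countOne(s):
--         return s.count('1')
--     binario = []
--     for i in range(2**n):
--         binario.append(bin(i))
--     binario.sort(key=countOne, reverse = True)
--     return binario
-- ===== SOURCE B (Python) =====
-- def hack(n, k):
--     # Counting-sort by popcount: bucket each bin(i) by its number of '1' bits,
--     # then concatenate buckets from highest popcount down to 0.
--     buckets = [[] for _ in range(n + 1)]
--     for i in range(2**n):
--         b = bin(i)
--         buckets[b.count('1')].append(b)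
--     out = []
--     for c in range(n, -1, -1):
--         out.extend(buckets[c])
--     return out
-- ===== Notes on version B (the rewrite author's own statement) =====
-- stated objective: alternative
-- what changed: replaces A's stable reverse comparison sort by popcount with a counting sort: one pass buckets each bin(i) by its count of '1' bits and the buckets are concatenated from popcount n down to 0
import Mathlib
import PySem

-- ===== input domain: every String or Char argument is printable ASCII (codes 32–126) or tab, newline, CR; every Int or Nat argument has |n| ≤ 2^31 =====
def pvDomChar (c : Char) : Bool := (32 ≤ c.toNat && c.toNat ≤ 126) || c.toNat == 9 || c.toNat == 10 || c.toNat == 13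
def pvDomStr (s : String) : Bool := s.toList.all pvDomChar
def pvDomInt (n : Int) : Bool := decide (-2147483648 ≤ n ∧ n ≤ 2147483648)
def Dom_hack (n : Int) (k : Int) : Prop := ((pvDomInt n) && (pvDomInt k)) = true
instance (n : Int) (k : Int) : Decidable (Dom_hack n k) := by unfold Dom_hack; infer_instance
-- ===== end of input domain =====

-- B replaces A's stable reverse comparison sort by popcount with a counting-sort:
-- one pass buckets each bin(i) by its '1'-count, buckets concatenated from popcount n down to 0.

-- ===== PORT A =====
def countOne (s : String) : Nat := PySem.Str.count s "1"

def hack (n : Int) (k : Int) : List String :=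
  let binario := (PySem.List.pyRange 0 ((2:Int) ^ n.toNat) 1).foldl
    (fun acc i => acc ++ [PySem.Int.pyBin i]) []
  PySem.List.sorted binario countOne true

-- ===== PORT B =====
def hack_alt (n : Int) (k : Int) : List String :=
  let buckets0 : List (List String) := List.replicate (n + 1).toNat []
  let buckets := (PySem.List.pyRange 0 ((2:Int) ^ n.toNat) 1).foldl
    (fun bs i =>
      let b := PySem.Int.pyBin i
      bs.modify (PySem.Str.count b "1") (fun t => t ++ [b])) buckets0
  -- buckets[c] : the index c is always in range here (0 ≤ c ≤ n < len(buckets)), so getD is exact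
  (PySem.List.pyRange n (-1) (-1)).foldl (fun out c => out ++ buckets.getD c.toNat []) []

-- ===== PRECONDITION & SPEC =====
-- Pre_ excludes n < 0, where Python's range(2**n) gets a float and raises TypeError (both A and B raise there).
def Pre_hack (n : Int) (k : Int) : Prop := 0 ≤ n
instance (n : Int) (k : Int) : Decidable (Pre_hack n k) := by unfold Pre_hack; infer_instance
def pvWitness_hack : Int × Int := (2, 0)

def Spec_hack (n : Int) (k : Int) (out : List String) : Prop := out = hack_alt n k
instance (n : Int) (k : Int) (out : List String) : Decidable (Spec_hack n k out) := by unfold Spec_hack; infer_instance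

-- ===== CLAIM (what is proved, stated in full; the proofs are below) =====
def Claim_equal_hack : Prop := ∀ (n : Int) (k : Int), Dom_hack n k → Pre_hack n k → Spec_hack n k (hack n k)

-- ===== LEMMAS AND PROOFS =====

-- counting a single character with Python's substring count is List.count
theorem chars_count_go_one (c : Char) (l : List Char) : ∀ (fuel acc : Nat), l.length ≤ fuel →
    PySem.Chars.count.go [c] fuel l acc = acc + l.count c := by
  induction l with
  | nil =>
    intro fuel acc _
    cases fuel <;> simp [PySem.Chars.count.go]
  | cons h t ih =>
    intro fuel acc hf
    cases fuel with
    | zero => simp at hf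
    | succ f =>
      simp only [List.length_cons, Nat.succ_le_succ_iff] at hf
      by_cases hc : h = c
      · subst hc
        simp [PySem.Chars.count.go, List.isPrefixOf, ih f (acc + 1) hf, List.count_cons]
        omega
      · have : ([c].isPrefixOf (h :: t)) = false := by
          simp [List.isPrefixOf]
          exact fun hh => (hc hh.symm).elim
        simp [PySem.Chars.count.go, this, ih f acc hf, List.count_cons, hc]

theorem chars_count_one (c : Char) (l : List Char) : PySem.Chars.count l [c] = l.count c := by
  simpa [PySem.Chars.count] using chars_count_go_one c l l.length 0 le_rfl

theorem countOne_pyBin (m : Nat) :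
    countOne (PySem.Int.pyBin (m : Int)) = (Nat.toDigits 2 m).count '1' := by
  have h1 : ("1" : String).toList = ['1'] := rfl
  have h : (PySem.Int.pyBin (m : Int)).toList = '0' :: 'b' :: Nat.toDigits 2 m := by
    rw [PySem.Int.toList_pyBin]
    simp [PySem.Int.toBinChars0b]
  simp [countOne, PySem.Str.count, h, h1, chars_count_one, List.count_cons]

theorem count_toDigits_le (m N : Nat) (h : m < 2 ^ N) : (Nat.toDigits 2 m).count '1' ≤ N := by
  rcases Nat.eq_zero_or_pos m with h0 | h0
  · subst h0
    simp [show Nat.toDigits 2 0 = ['0'] from rfl]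
  · have hN : 0 < N := by
      by_contra hN
      interval_cases N <;> omega
    calc (Nat.toDigits 2 m).count '1' ≤ (Nat.toDigits 2 m).length := List.count_le_length
      _ ≤ N := Nat.toDigits_length 2 m N hN h

-- pyRange 0 N 1, as the mapped Nat range
theorem pyRange_zero_natCast (N : Nat) :
    PySem.List.pyRange 0 (N : Int) 1 = (List.range N).map (fun (j : Nat) => (j : Int)) := by
  induction N with
  | zero => simp [PySem.List.pyRange_one_eq_nil]
  | succ N ih =>
    have : ((N + 1 : Nat) : Int) = (N : Int) + 1 := by push_cast; ring
    rw [this, PySem.List.pyRange_one_succ_right (by positivity), ih, List.range_succ]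
    simp

-- descending bucket concatenation
def dflt (key : String → Nat) (cs : List Nat) (l : List String) : List String :=
  cs.flatMap (fun c => l.filter (fun s => key s = c))

theorem dflt_nil (key : String → Nat) (cs : List Nat) : dflt key cs [] = [] := by
  simp [dflt]

theorem dflt_append_cs (key : String → Nat) (c1 c2 : List Nat) (l : List String) :
    dflt key (c1 ++ c2) l = dflt key c1 l ++ dflt key c2 l := by
  simp [dflt]

theorem mem_key_of_mem_dflt (key : String → Nat) (cs : List Nat) (l : List String)
    (y : String) (hy : y ∈ dflt key cs l) : key y ∈ cs := by
  simp only [dflt, List.mem_flatMap, List.mem_filter, decide_eq_true_eq] at hy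
  obtain ⟨c, hc, _, hk⟩ := hy
  exact hk ▸ hc

theorem dflt_snoc_not_mem (key : String → Nat) (cs : List Nat) (l : List String) (x : String)
    (hx : key x ∉ cs) : dflt key cs (l ++ [x]) = dflt key cs l := by
  induction cs with
  | nil => simp [dflt]
  | cons c cs ih =>
    simp only [List.mem_cons, not_or] at hx
    simp only [dflt, List.flatMap_cons] at ih ⊢
    rw [ih hx.2, List.filter_append]
    have : List.filter (fun s => decide (key s = c)) [x] = [] := by
      simp [List.filter, hx.1]
    simp [this]

theorem insertBy_append_left {α : Type} (bef : α → α → Bool) (x : α) (A B : List α)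
    (h : ∀ y ∈ A, bef x y = false) :
    PySem.List.insertBy bef x (A ++ B) = A ++ PySem.List.insertBy bef x B := by
  induction A with
  | nil => simp
  | cons a A ih =>
    have ha : bef x a = false := h a (by simp)
    simp only [List.cons_append, PySem.List.insertBy, ha, Bool.false_eq_true, if_false]
    rw [ih (fun y hy => h y (by simp [hy]))]

theorem insertBy_cons_of {α : Type} (bef : α → α → Bool) (x : α) (B : List α)
    (h : ∀ y ∈ B, bef x y = true) :
    PySem.List.insertBy bef x B = x :: B := by
  cases B with
  | nil => simp [PySem.List.insertBy]
  | cons b B => simp [PySem.List.insertBy, h b (by simp)]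

-- stable descending sort by a bounded Nat key IS the descending bucket concatenation
theorem sorted_rev_eq_dflt (key : String → Nat) (N : Nat) (l : List String)
    (hb : ∀ s ∈ l, key s ≤ N) :
    PySem.List.sorted l key true = dflt key ((List.range (N + 1)).reverse) l := by
  rw [PySem.List.sorted_rev_eq_foldl_insertBy]
  induction l using List.reverseRecOn with
  | nil => simp [dflt_nil]
  | append_singleton l x ih =>
    rw [List.foldl_append, List.foldl_cons, List.foldl_nil,
      ih (fun s hs => hb s (by simp [hs]))]
    set k := key x with hk
    have hkN : k ≤ N := hb x (by simp)
    -- split the descending index list at k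
    have hsplit : List.range (N + 1) =
        List.range (k + 1) ++ (List.range (N - k)).map (fun j => (k + 1) + j) := by
      have : N + 1 = (k + 1) + (N - k) := by omega
      rw [this, List.range_add]
    have hrev : (List.range (N + 1)).reverse =
        ((List.range (N - k)).map (fun j => (k + 1) + j)).reverse
          ++ (k :: (List.range k).reverse) := by
      rw [hsplit, List.reverse_append, List.range_succ, List.reverse_append]
      simp
    set hi : List Nat := ((List.range (N - k)).map (fun j => (k + 1) + j)).reverse with hhi
    have hhi_gt : ∀ c ∈ hi, k < c := by
      intro c hc
      simp [hhi] at hc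
      omega
    have hlo_lt : ∀ c ∈ (List.range k).reverse, c < k := by
      intro c hc; simpa using hc
    -- LHS: insert x after the ≥ k buckets, before the < k buckets
    have hdesc : dflt key ((List.range (N + 1)).reverse) l =
        (dflt key hi l ++ l.filter (fun s => key s = k)) ++ dflt key ((List.range k).reverse) l := by
      rw [hrev, dflt_append_cs]
      simp [dflt, List.flatMap_cons, List.append_assoc]
    have e1 : PySem.List.insertBy (fun a b => decide (key b < key a)) x
        ((dflt key hi l ++ l.filter (fun s => key s = k)) ++ dflt key ((List.range k).reverse) l)
        = (dflt key hi l ++ l.filter (fun s => key s = k))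
          ++ PySem.List.insertBy (fun a b => decide (key b < key a)) x
              (dflt key ((List.range k).reverse) l) := by
      apply insertBy_append_left
      intro y hy
      rcases List.mem_append.1 hy with hy | hy
      · have := hhi_gt _ (mem_key_of_mem_dflt key _ l y hy)
        simp; omega
      · have hyk : key y = k := by simpa using (List.mem_filter.1 hy).2
        simp [hyk, hk]
    have e2 : PySem.List.insertBy (fun a b => decide (key b < key a)) x
        (dflt key ((List.range k).reverse) l) = x :: dflt key ((List.range k).reverse) l := by
      apply insertBy_cons_of
      intro y hy
      have := hlo_lt _ (mem_key_of_mem_dflt key _ l y hy)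
      simp; omega
    rw [hdesc, e1, e2]
    -- now identify with the buckets of l ++ [x]
    rw [hrev, dflt_append_cs]
    have h1 : dflt key hi (l ++ [x]) = dflt key hi l := by
      apply dflt_snoc_not_mem
      intro hmem; exact absurd (hhi_gt _ hmem) (by omega)
    have h2 : dflt key ((List.range k).reverse) (l ++ [x]) =
        dflt key ((List.range k).reverse) l := by
      apply dflt_snoc_not_mem
      intro hmem; exact absurd (hlo_lt _ hmem) (by omega)
    have h3 : List.filter (fun s => decide (key s = k)) [x] = [x] := by
      simp [List.filter, hk]
    simp only [dflt, List.flatMap_cons, List.filter_append, h3] at h1 h2 ⊢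
    rw [h1, h2]
    simp [List.append_assoc]

-- B-side: the bucket-building fold keeps buckets = per-popcount filters
theorem modify_map_range (f : Nat → List String) (M q : Nat) (hq : q < M)
    (h : List String → List String) :
    ((List.range M).map f).modify q h
      = (List.range M).map (fun c => if c = q then h (f c) else f c) := by
  apply List.ext_getElem
  · simp
  · intro j hj hj2
    simp only [List.length_map, List.length_range] at hj2
    rw [List.getElem_modify]
    simp only [List.getElem_map, List.getElem_range]
    by_cases hjq : j = q
    · simp [hjq]
    · simp [hjq, Ne.symm hjq]

theorem buckets_foldl_eq (key : String → Nat) (M : Nat) :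
    ∀ (l P : List String), (∀ s ∈ l, key s < M) →
    l.foldl (fun bs s => bs.modify (key s) (fun t => t ++ [s]))
        ((List.range M).map (fun c => P.filter (fun s => key s = c)))
      = (List.range M).map (fun c => (P ++ l).filter (fun s => key s = c)) := by
  intro l
  induction l with
  | nil => intro P _; simp
  | cons s l ih =>
    intro P hl
    rw [List.foldl_cons, modify_map_range _ M (key s) (hl s (by simp))]
    have hstep : (fun c => if c = key s
          then P.filter (fun t => key t = c) ++ [s]
          else P.filter (fun t => key t = c))
        = fun c => (P ++ [s]).filter (fun t => key t = c) := by
      funext c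
      rw [List.filter_append]
      by_cases hc : c = key s
      · simp [List.filter, hc]
      · have : List.filter (fun t => decide (key t = c)) [s] = [] := by
          simp [List.filter, Ne.symm hc]
        simp [hc, this]
    rw [hstep, ih (P ++ [s]) (fun t ht => hl t (by simp [ht]))]
    simp

theorem getD_map_range (g : Nat → List String) (M c : Nat) (hc : c < M) :
    ((List.range M).map g).getD c [] = g c := by
  simp [List.getD, List.getElem?_map, List.getElem?_range, hc]

-- the binary list both programs iterate over
def binList (N : Nat) : List String := (List.range (2 ^ N)).map (fun (m : Nat) => PySem.Int.pyBin (m : Int))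

theorem binList_bound (N : Nat) : ∀ s ∈ binList N, countOne s ≤ N := by
  intro s hs
  rw [binList] at hs
  obtain ⟨m, hm, rfl⟩ := List.mem_map.1 hs
  rw [List.mem_range] at hm
  rw [countOne_pyBin]
  exact count_toDigits_le m N hm

theorem pow_cast (N : Nat) : ((2 : Int) ^ N) = ((2 ^ N : Nat) : Int) := by push_cast; ring

theorem hack_eq_dflt (n : Int) (hn : 0 ≤ n) :
    hack n 0 = dflt countOne ((List.range (n.toNat + 1)).reverse) (binList n.toNat) := by
  have h : hack n 0 = PySem.List.sorted (binList n.toNat) countOne true := by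
    simp only [hack, PySem.List.foldl_append_singleton_eq_map, List.nil_append,
      pow_cast, pyRange_zero_natCast, binList, List.map_map]
    rfl
  rw [h]
  exact sorted_rev_eq_dflt countOne n.toNat (binList n.toNat) (binList_bound n.toNat)

theorem flatMap_congr_mem' {α β : Type} (l : List α) (f g : α → List β)
    (h : ∀ a ∈ l, f a = g a) : l.flatMap f = l.flatMap g := by
  simp only [List.flatMap_def]
  rw [List.map_congr_left h]

theorem reverse_range_eq_map (M : Nat) :
    (List.range (M + 1)).reverse = (List.range (M + 1)).map (fun j => M - j) := by
  rw [List.range_eq_range', List.reverse_range', ← List.range_eq_range']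
  congr 1
  funext j
  omega

theorem hack_alt_eq_dflt (n : Int) (hn : 0 ≤ n) :
    hack_alt n 0 = dflt countOne ((List.range (n.toNat + 1)).reverse) (binList n.toNat) := by
  set N := n.toNat with hN
  have hn1 : (n + 1).toNat = N + 1 := by omega
  have hbuckets :
      (PySem.List.pyRange 0 ((2:Int) ^ n.toNat) 1).foldl
        (fun bs i =>
          let b := PySem.Int.pyBin i
          bs.modify (PySem.Str.count b "1") (fun t => t ++ [b]))
        (List.replicate (n + 1).toNat [])
      = (List.range (N + 1)).map (fun c => (binList N).filter (fun s => countOne s = c)) := by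
    have hinit : List.replicate (n + 1).toNat ([] : List String)
        = (List.range (N + 1)).map (fun c => ([] : List String).filter (fun s => countOne s = c)) := by
      rw [hn1]
      simp [List.eq_replicate_iff]
    rw [hinit, pow_cast, pyRange_zero_natCast, List.foldl_map]
    have := buckets_foldl_eq countOne (N + 1) (binList N) []
      (fun s hs => Nat.lt_succ_of_le (binList_bound N s hs))
    simp only [List.nil_append] at this
    rw [← this]
    rw [binList, List.foldl_map]
    rfl
  simp only [hack_alt]
  rw [hbuckets, PySem.List.pyRange_neg_one]
  have hlen : (n - (-1)).toNat = N + 1 := by omega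
  rw [hlen, List.foldl_map, PySem.List.foldl_append_eq_flatMap, List.nil_append,
    reverse_range_eq_map, dflt, List.flatMap_map]
  apply flatMap_congr_mem'
  intro j hj
  have hjN : j ≤ N := by simpa [Nat.lt_succ_iff] using hj
  have ht : (n - (j : Int)).toNat = N - j := by omega
  rw [ht, getD_map_range _ _ _ (by omega)]

-- ===== VERDICT (by name: the statement is the Claim_ definition above) =====
theorem hack_spec : Claim_equal_hack := by
  intro n k _ hpre
  unfold Spec_hack
  have hA : hack n k = hack n 0 := rfl
  have hB : hack_alt n k = hack_alt n 0 := rfl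
  rw [hA, hB, hack_eq_dflt n hpre, hack_alt_eq_dflt n hpre]
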